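-- pv_equiv track=rewrite | github.com/Igaki12/fast-api-medical-answer-generator | app/services/legacy/convert_markdown.py | _inject_attribution_to_blockquotes
-- ===== SOURCE A (Python) =====
-- def _inject_attribution_to_blockquotes(md_text: str, attribution_text: str) -> str:
--     lines = md_text.splitlines(keepends=False)
--     out: list[str] = []
--     i = 0
--     n = len(lines)
--
--     def quoted_snippet(attr: str) -> list[str]:
--         return [
--             ">",
--             "> \\par\\vspace{0.8\\baselineskip}",
--             "> \\begin{flushright}\\footnotesize",
--             f"> --- {attr}",
--             "> \\end{flushright}",
--         ]
--
--     while i < n: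
--         line = lines[i]
--         if line.lstrip().startswith(">"):
--             block: list[str] = []
--             while i < n and lines[i].lstrip().startswith(">"):
--                 block.append(lines[i])
--                 i += 1
--
--             joined_tail = "\n".join(block[-10:]) if block else ""
--             has_attr = (
--                 "\\begin{flushright}" in joined_tail
--                 or "\\QuoteAttribution" in joined_tail
--                 or (attribution_text and attribution_text in joined_tail)
--             )
--             if not has_attr:
--                 block.extend(quoted_snippet(attribution_text))
--             out.extend(block)
--             continue
--
--         out.append(line)
--         i += 1
--
--     return "\n".join(out) + ("\n" if md_text.endswith("\n") else "")
-- ===== SOURCE B (Python) =====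
-- def _inject_attribution_to_blockquotes(md_text: str, attribution_text: str) -> str:
--     # Staged passes over index space: compute the quote-flag list, detect run
--     # boundaries by comparing each flag with its neighbours, pair starts with
--     # ends, mark the run-ends whose tail lacks an attribution, then emit every
--     # line once inserting the snippet after each marked index.
--     lines = md_text.splitlines()
--     n = len(lines)
--     q = [line.lstrip().startswith(">") for line in lines]
--     starts = [i for i in range(n) if q[i] and (i == 0 or not q[i - 1])]
--     ends = [i for i in range(n) if q[i] and (i == n - 1 or not q[i + 1])]
--     snippet = [
--         ">",
--         "> \\par\\vspace{0.8\\baselineskip}",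
--         "> \\begin{flushright}\\footnotesize",
--         f"> --- {attribution_text}",
--         "> \\end{flushright}",
--     ]
--
--     def lacks_attr(s: int, e: int) -> bool:
--         tail = "\n".join(lines[max(s, e - 9):e + 1])
--         return not (
--             "\\begin{flushright}" in tail
--             or "\\QuoteAttribution" in tail
--             or (attribution_text and attribution_text in tail)
--         )
--
--     needs = [e for s, e in zip(starts, ends) if lacks_attr(s, e)]
--     out = []
--     for i, line in enumerate(lines):
--         out.append(line)
--         if i in needs:
--             out.extend(snippet)
--     return "\n".join(out) + ("\n" if md_text.endswith("\n") else "")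
-- ===== Notes on version B (the rewrite author's own statement) =====
-- stated objective: alternative
-- what changed: A's nested index-while loops that accumulate each blockquote run are replaced by staged passes over the index space: a quote-flag list, run starts/ends detected by comparing each flag with its neighbours, zip-pairing starts with ends to mark the run-end indices whose tail lacks attribution, then one emit pass that inserts the snippet after each marked index; no run accumulator exists.
import Mathlib
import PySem

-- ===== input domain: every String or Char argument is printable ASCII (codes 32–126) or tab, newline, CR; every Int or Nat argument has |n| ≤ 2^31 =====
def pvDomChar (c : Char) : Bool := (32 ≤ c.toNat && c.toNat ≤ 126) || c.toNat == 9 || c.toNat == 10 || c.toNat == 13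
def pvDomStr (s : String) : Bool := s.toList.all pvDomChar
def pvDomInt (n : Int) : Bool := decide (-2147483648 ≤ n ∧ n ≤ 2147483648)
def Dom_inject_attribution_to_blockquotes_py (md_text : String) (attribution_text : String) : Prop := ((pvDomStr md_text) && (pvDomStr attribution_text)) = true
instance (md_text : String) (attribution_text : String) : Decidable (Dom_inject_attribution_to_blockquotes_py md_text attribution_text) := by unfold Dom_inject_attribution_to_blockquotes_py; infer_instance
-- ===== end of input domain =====

-- B replaces A's nested index-while run accumulation by staged passes: a quote-flag
-- list, run boundaries found by comparing neighbouring flags, marked run-end indices,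
-- then one emit pass inserting the snippet after each marked index; objective: alternative.

-- line.lstrip().startswith(">")  (used by both Pythons)
def pvIsQuote (l : String) : Bool := PySem.Str.startswith (PySem.Str.lstrip l) ">"

-- ===== PORT A =====
-- quoted_snippet(attr)
def pvQuotedSnippet (attr : String) : List String :=
  [">",
   "> \\par\\vspace{0.8\\baselineskip}",
   "> \\begin{flushright}\\footnotesize",
   "> --- " ++ attr,
   "> \\end{flushright}"]

-- the inner while: collect the run of quote lines into block, return (block, remaining lines)
def pvACollect (block : List String) (lines : List String) : List String × List String :=
  match lines with
  | [] => (block, [])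
  | l :: rest => if pvIsQuote l then pvACollect (block ++ [l]) rest else (block, l :: rest)

-- straight-line body after the inner while: joined_tail, has_attr, optional extend
def pvAProcess (attr : String) (block : List String) : List String :=
  let joined_tail := if block.isEmpty then "" else
    PySem.Str.join "\n" (PySem.List.slice block (some (-10)) none)
  let has_attr := PySem.Str.isIn "\\begin{flushright}" joined_tail
    || PySem.Str.isIn "\\QuoteAttribution" joined_tail
    || (!(attr == "") && PySem.Str.isIn attr joined_tail)
  if has_attr then block else block ++ pvQuotedSnippet attr

-- cited by pvALoop's decreasing_by
theorem pvACollect_snd_length_le (lines : List String) : ∀ block,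
    (pvACollect block lines).2.length ≤ lines.length := by
  induction lines with
  | nil => intro block; simp [pvACollect]
  | cons l rest ih =>
    intro block
    by_cases h : pvIsQuote l
    · simp only [pvACollect, h, if_pos]
      exact Nat.le_succ_of_le (ih _)
    · simp [pvACollect, h]

-- the outer while loop of A
def pvALoop (attr : String) (lines : List String) (out : List String) : List String :=
  match lines with
  | [] => out
  | l :: rest =>
    if h : pvIsQuote l then
      pvALoop attr (pvACollect [] (l :: rest)).2
        (out ++ pvAProcess attr (pvACollect [] (l :: rest)).1)
    else
      pvALoop attr rest (out ++ [l])
termination_by lines.length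
decreasing_by
  · simp only [pvACollect, h, if_pos, List.length_cons]
    exact Nat.lt_succ_of_le (pvACollect_snd_length_le rest _)
  · simp

def inject_attribution_to_blockquotes_py (md_text : String) (attribution_text : String) : String :=
  PySem.Str.join "\n" (pvALoop attribution_text (PySem.Str.splitlines md_text) [])
    ++ (if PySem.Str.endswith md_text "\n" then "\n" else "")

-- ===== PORT B =====
-- starts = [i for i in range(n) if q[i] and (i == 0 or not q[i-1])]
def pvBStarts (q : List Bool) : List Nat :=
  (List.range q.length).filter (fun i => q.getD i false && (decide (i = 0) || !(q.getD (i - 1) false)))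

-- ends = [i for i in range(n) if q[i] and (i == n-1 or not q[i+1])]
def pvBEnds (q : List Bool) : List Nat :=
  (List.range q.length).filter (fun i => q.getD i false && (decide (i = q.length - 1) || !(q.getD (i + 1) false)))

-- lacks_attr(s, e): tail = "\n".join(lines[max(s, e-9):e+1]); not (… in tail or …)
def pvBLacks (lines : List String) (attr : String) (s e : Nat) : Bool :=
  let tail := PySem.Str.join "\n"
    (PySem.List.slice lines (some (max (s : Int) ((e : Int) - 9))) (some ((e : Int) + 1)))
  !(PySem.Str.isIn "\\begin{flushright}" tail
    || PySem.Str.isIn "\\QuoteAttribution" tail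
    || (!(attr == "") && PySem.Str.isIn attr tail))

-- snippet list of B
def pvBSnippet (attr : String) : List String :=
  [">",
   "> \\par\\vspace{0.8\\baselineskip}",
   "> \\begin{flushright}\\footnotesize",
   "> --- " ++ attr,
   "> \\end{flushright}"]

-- needs = [e for s, e in zip(starts, ends) if lacks_attr(s, e)]
def pvBNeeds (lines : List String) (attr : String) : List Nat :=
  (((pvBStarts (lines.map pvIsQuote)).zip (pvBEnds (lines.map pvIsQuote))).filter
    (fun se => pvBLacks lines attr se.1 se.2)).map Prod.snd

def inject_attribution_to_blockquotes_py_alt (md_text : String) (attribution_text : String) : String :=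
  let lines := PySem.Str.splitlines md_text
  let needs := pvBNeeds lines attribution_text
  -- for i, line in enumerate(lines): out.append(line); if i in needs: out.extend(snippet)
  let out := ((List.range lines.length).zip lines).foldl
    (fun out il =>
      let out := out ++ [il.2]
      if needs.contains il.1 then out ++ pvBSnippet attribution_text else out) []
  PySem.Str.join "\n" out ++ (if PySem.Str.endswith md_text "\n" then "\n" else "")

-- ===== PRECONDITION & SPEC =====
def Spec_inject_attribution_to_blockquotes_py (md_text : String) (attribution_text : String) (out : String) : Prop := out = inject_attribution_to_blockquotes_py_alt md_text attribution_text
instance (md_text : String) (attribution_text : String) (out : String) : Decidable (Spec_inject_attribution_to_blockquotes_py md_text attribution_text out) := by unfold Spec_inject_attribution_to_blockquotes_py; infer_instance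

-- ===== CLAIM =====
def Claim_equal_inject_attribution_to_blockquotes_py : Prop := ∀ (md_text : String) (attribution_text : String), Dom_inject_attribution_to_blockquotes_py md_text attribution_text → Spec_inject_attribution_to_blockquotes_py md_text attribution_text (inject_attribution_to_blockquotes_py md_text attribution_text)

-- ===== LEMMAS AND PROOFS =====

-- recursive view of B's emit loop
def pvEmitRec (snip : List String) (needs : List Nat) (k : Nat) : List String → List String
  | [] => []
  | l :: ls => l :: (if needs.contains k then snip else []) ++ pvEmitRec snip needs (k + 1) ls

theorem pvEmit_fold_eq (snip : List String) (needs : List Nat) :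
    ∀ (ls : List String) (k : Nat) (acc : List String),
    ((List.range' k ls.length).zip ls).foldl
      (fun out il =>
        let out := out ++ [il.2]
        if needs.contains il.1 then out ++ snip else out) acc
      = acc ++ pvEmitRec snip needs k ls := by
  intro ls
  induction ls with
  | nil => intro k acc; simp [pvEmitRec]
  | cons l ls ih =>
    intro k acc
    rw [List.length_cons, List.range'_succ]
    simp only [List.zip_cons_cons, List.foldl_cons]
    rw [ih]
    by_cases h : k ∈ needs <;> simp [pvEmitRec, h]

theorem pvEmitRec_congr (snip : List String) (N1 N2 : List Nat)
    (ls : List String) : ∀ k, (∀ i, k ≤ i → N1.contains i = N2.contains i) →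
    pvEmitRec snip N1 k ls = pvEmitRec snip N2 k ls := by
  induction ls with
  | nil => intro k _; rfl
  | cons l ls ih =>
    intro k h
    simp only [pvEmitRec, h k (le_refl k)]
    rw [ih (k + 1) (fun i hi => h i (by omega))]

theorem pvEmitRec_shift (snip : List String) (N : List Nat) (m : Nat)
    (ls : List String) : ∀ k,
    pvEmitRec snip (N.map (· + m)) (k + m) ls = pvEmitRec snip N k ls := by
  induction ls with
  | nil => intro k; rfl
  | cons l ls ih =>
    intro k
    have hc : (N.map (· + m)).contains (k + m) = N.contains k := by
      by_cases h : k ∈ N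
      · simp [h]
      · have h2 : k + m ∉ N.map (· + m) := by
          intro hmem
          rcases List.mem_map.mp hmem with ⟨a, ha, hae⟩
          have : a = k := by omega
          exact h (this ▸ ha)
        simp [h, h2]
    simp only [pvEmitRec, hc]
    have := ih (k + 1)
    rw [show k + 1 + m = k + m + 1 by omega] at this
    rw [this]

theorem pvEmitRec_append (snip : List String) (N : List Nat) :
    ∀ (xs ys : List String) (k : Nat),
    pvEmitRec snip N k (xs ++ ys) = pvEmitRec snip N k xs ++ pvEmitRec snip N (k + xs.length) ys := by
  intro xs
  induction xs with
  | nil => intro ys k; simp [pvEmitRec]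
  | cons x xs ih =>
    intro ys k
    simp only [List.cons_append, pvEmitRec, List.length_cons]
    rw [ih ys (k + 1), show k + 1 + xs.length = k + (xs.length + 1) by omega]
    simp

-- a run whose only possibly-marked index is its last line
theorem pvEmitRec_run (snip : List String) (N : List Nat) :
    ∀ (xs : List String) (k : Nat), xs ≠ [] →
    (∀ i ∈ N, i = k + xs.length - 1 ∨ k + xs.length ≤ i) →
    pvEmitRec snip N k xs = xs ++ (if N.contains (k + xs.length - 1) then snip else []) := by
  intro xs
  induction xs with
  | nil => intro k h; exact absurd rfl h
  | cons x xs ih =>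
    intro k _ h
    cases xs with
    | nil => simp [pvEmitRec]
    | cons y ys =>
      have hk : N.contains k = false := by
        have : k ∉ N := by
          intro hm
          rcases h k hm with h1 | h1 <;> simp only [List.length_cons] at h1 <;> omega
        simp [this]
      have hstep : pvEmitRec snip N k (x :: y :: ys)
          = x :: ((if N.contains k then snip else []) ++ pvEmitRec snip N (k + 1) (y :: ys)) := rfl
      rw [hstep, hk]
      simp only [Bool.false_eq_true, if_false, List.nil_append]
      rw [ih (k + 1) (by simp) (fun i hi => by
        rcases h i hi with h1 | h1
        · left; simp only [List.length_cons] at h1 ⊢; omega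
        · right; simp only [List.length_cons] at h1 ⊢; omega)]
      have hidx : k + 1 + (y :: ys).length - 1 = k + (x :: y :: ys).length - 1 := by
        simp only [List.length_cons]; omega
      rw [hidx]
      simp

-- shift of starts over a leading non-quote flag
theorem pvBStarts_cons_false (q : List Bool) :
    pvBStarts (false :: q) = (pvBStarts q).map (· + 1) := by
  unfold pvBStarts
  have h1 : List.range (false :: q).length = 0 :: (List.range q.length).map Nat.succ := by
    rw [List.length_cons, List.range_succ_eq_map]
  rw [h1, List.filter_cons]
  simp only [List.getD_cons_zero, Bool.false_and, Bool.false_eq_true, if_false]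
  rw [List.filter_map]
  have h2 : (List.range q.length).filter
      ((fun i => (false :: q).getD i false && (decide (i = 0) || !((false :: q).getD (i - 1) false))) ∘ Nat.succ)
      = (List.range q.length).filter (fun i => q.getD i false && (decide (i = 0) || !(q.getD (i - 1) false))) := by
    apply List.filter_congr
    intro i _
    show ((false :: q).getD i.succ false && (decide (i.succ = 0) || !((false :: q).getD (i.succ - 1) false)))
        = (q.getD i false && (decide (i = 0) || !(q.getD (i - 1) false)))
    cases i with
    | zero => simp
    | succ j => simp
  rw [h2]

theorem pvBEnds_cons_false (q : List Bool) :
    pvBEnds (false :: q) = (pvBEnds q).map (· + 1) := by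
  unfold pvBEnds
  have h1 : List.range (false :: q).length = 0 :: (List.range q.length).map Nat.succ := by
    rw [List.length_cons, List.range_succ_eq_map]
  rw [h1, List.filter_cons]
  simp only [List.getD_cons_zero, Bool.false_and, Bool.false_eq_true, if_false]
  rw [List.filter_map]
  have h2 : (List.range q.length).filter
      ((fun i => (false :: q).getD i false && (decide (i = (false :: q).length - 1) || !((false :: q).getD (i + 1) false))) ∘ Nat.succ)
      = (List.range q.length).filter (fun i => q.getD i false && (decide (i = q.length - 1) || !(q.getD (i + 1) false))) := by
    apply List.filter_congr
    intro i hi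
    have hi' : i < q.length := List.mem_range.mp hi
    show ((false :: q).getD i.succ false && (decide (i.succ = (false :: q).length - 1) || !((false :: q).getD (i.succ + 1) false)))
        = (q.getD i false && (decide (i = q.length - 1) || !(q.getD (i + 1) false)))
    have hd : decide (i.succ = (false :: q).length - 1) = decide (i = q.length - 1) := by
      apply decide_eq_decide.mpr
      simp only [List.length_cons]
      omega
    rw [hd]
    simp
  rw [h2]

-- getD facts for a leading replicate-true run
theorem pvGetD_run_lt (m : Nat) (r : List Bool) (i : Nat) (hi : i < m) :
    (List.replicate m true ++ r).getD i false = true := by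
  rw [List.getD_eq_getElem?_getD, List.getElem?_append_left (by simp [hi])]
  simp [List.getElem?_replicate, hi]

theorem pvGetD_run_ge (m : Nat) (r : List Bool) (j : Nat) :
    (List.replicate m true ++ r).getD (m + j) false = r.getD j false := by
  rw [List.getD_eq_getElem?_getD, List.getElem?_append_right (by simp : (List.replicate m true).length ≤ m + j)]
  rw [List.getD_eq_getElem?_getD]
  simp

-- starts over a maximal leading run of quote flags
theorem pvBStarts_run (m : Nat) (hm : 1 ≤ m) (r : List Bool) (hr : r.getD 0 false = false) :
    pvBStarts (List.replicate m true ++ r) = 0 :: (pvBStarts r).map (· + m) := by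
  unfold pvBStarts
  have h1 : List.range (List.replicate m true ++ r).length
      = List.range m ++ (List.range r.length).map (fun x => m + x) := by
    rw [show (List.replicate m true ++ r).length = m + r.length by simp, List.range_add]
  rw [h1, List.filter_append, List.filter_map]
  have h2 : (List.range m).filter
      (fun i => (List.replicate m true ++ r).getD i false && (decide (i = 0) || !((List.replicate m true ++ r).getD (i - 1) false)))
      = (List.range m).filter (fun i => decide (i = 0)) := by
    apply List.filter_congr
    intro i hi
    have hi' : i < m := List.mem_range.mp hi
    rw [pvGetD_run_lt m r i hi']
    cases i with
    | zero => simp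
    | succ j =>
      rw [show j + 1 - 1 = j by omega, pvGetD_run_lt m r j (by omega)]
      simp
  have h3 : (List.range m).filter (fun i => decide (i = 0)) = [0] := by
    obtain ⟨k, rfl⟩ : ∃ k, m = k + 1 := ⟨m - 1, by omega⟩
    rw [List.range_succ_eq_map, List.filter_cons]
    simp only [decide_true, if_true]
    congr 1
    apply List.filter_eq_nil_iff.mpr
    intro a ha
    rcases List.mem_map.mp ha with ⟨b, _, rfl⟩
    simp
  rw [h2, h3]
  have h4 : (List.range r.length).filter
      ((fun i => (List.replicate m true ++ r).getD i false && (decide (i = 0) || !((List.replicate m true ++ r).getD (i - 1) false))) ∘ (fun x => m + x))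
      = (List.range r.length).filter (fun i => r.getD i false && (decide (i = 0) || !(r.getD (i - 1) false))) := by
    apply List.filter_congr
    intro j _
    show ((List.replicate m true ++ r).getD (m + j) false && (decide (m + j = 0) || !((List.replicate m true ++ r).getD (m + j - 1) false)))
        = (r.getD j false && (decide (j = 0) || !(r.getD (j - 1) false)))
    rw [pvGetD_run_ge m r j]
    have hd0 : decide (m + j = 0) = false := decide_eq_false (by omega)
    rw [hd0]
    cases j with
    | zero =>
      rw [show m + 0 - 1 = m - 1 by omega, pvGetD_run_lt m r (m - 1) (by omega)]
      have hr' := hr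
      rw [List.getD_eq_getElem?_getD] at hr'
      simp [hr']
    | succ j' =>
      rw [show m + (j' + 1) - 1 = m + j' by omega, pvGetD_run_ge m r j']
      simp
  rw [h4]
  have h5 : (fun x : Nat => m + x) = (fun x : Nat => x + m) := funext fun x => Nat.add_comm m x
  rw [h5]
  rfl

-- ends over a maximal leading run of quote flags
set_option maxHeartbeats 1000000 in
theorem pvBEnds_run (m : Nat) (hm : 1 ≤ m) (r : List Bool) (hr : r.getD 0 false = false) :
    pvBEnds (List.replicate m true ++ r) = (m - 1) :: (pvBEnds r).map (· + m) := by
  unfold pvBEnds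
  have hlen : (List.replicate m true ++ r).length = m + r.length := by simp
  have h1 : List.range (List.replicate m true ++ r).length
      = List.range m ++ (List.range r.length).map (fun x => m + x) := by
    rw [hlen, List.range_add]
  rw [h1, List.filter_append, List.filter_map]
  have h2 : (List.range m).filter
      (fun i => (List.replicate m true ++ r).getD i false && (decide (i = (List.replicate m true ++ r).length - 1) || !((List.replicate m true ++ r).getD (i + 1) false)))
      = (List.range m).filter (fun i => decide (i = m - 1)) := by
    apply List.filter_congr
    intro i hi
    have hi' : i < m := List.mem_range.mp hi
    rw [pvGetD_run_lt m r i hi']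
    rcases Nat.lt_or_ge i (m - 1) with hlt | hge
    · rw [pvGetD_run_lt m r (i + 1) (by omega)]
      have d1 : decide (i = (List.replicate m true ++ r).length - 1) = false :=
        decide_eq_false (by rw [hlen]; omega)
      have d2 : decide (i = m - 1) = false := decide_eq_false (by omega)
      rw [d1, d2]
      rfl
    · have hieq : i = m - 1 := by omega
      subst hieq
      have d2 : decide (m - 1 = m - 1) = true := decide_eq_true rfl
      rcases Nat.eq_zero_or_pos r.length with h0 | hpos
      · have d1 : decide (m - 1 = (List.replicate m true ++ r).length - 1) = true :=
          decide_eq_true (by rw [hlen]; omega)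
        rw [d1, d2]
        simp
      · rw [show m - 1 + 1 = m + 0 by omega, pvGetD_run_ge m r 0, hr, d2]
        simp
  have h3 : (List.range m).filter (fun i => decide (i = m - 1)) = [m - 1] := by
    obtain ⟨k, rfl⟩ : ∃ k, m = k + 1 := ⟨m - 1, by omega⟩
    rw [List.range_succ, List.filter_append]
    have ha : (List.range k).filter (fun i => decide (i = k + 1 - 1)) = [] := by
      apply List.filter_eq_nil_iff.mpr
      intro a ha
      have := List.mem_range.mp ha
      simp
      omega
    rw [ha]
    simp
  rw [h2, h3]
  have h4 : (List.range r.length).filter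
      ((fun i => (List.replicate m true ++ r).getD i false && (decide (i = (List.replicate m true ++ r).length - 1) || !((List.replicate m true ++ r).getD (i + 1) false))) ∘ (fun x => m + x))
      = (List.range r.length).filter (fun i => r.getD i false && (decide (i = r.length - 1) || !(r.getD (i + 1) false))) := by
    apply List.filter_congr
    intro j hj
    have hj' : j < r.length := List.mem_range.mp hj
    show ((List.replicate m true ++ r).getD (m + j) false && (decide (m + j = (List.replicate m true ++ r).length - 1) || !((List.replicate m true ++ r).getD (m + j + 1) false)))
        = (r.getD j false && (decide (j = r.length - 1) || !(r.getD (j + 1) false)))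
    rw [pvGetD_run_ge m r j]
    have hd : decide (m + j = (List.replicate m true ++ r).length - 1) = decide (j = r.length - 1) := by
      apply decide_eq_decide.mpr
      rw [hlen]
      omega
    rw [hd, show m + j + 1 = m + (j + 1) by omega, pvGetD_run_ge m r (j + 1)]
  rw [h4]
  have h5 : (fun x : Nat => m + x) = (fun x : Nat => x + m) := funext fun x => Nat.add_comm m x
  rw [h5]
  rfl

-- the lacks test only looks at indices past the prefix, so it shifts
theorem pvBLacks_append (pre lines : List String) (attr : String) (s e : Nat) :
    pvBLacks (pre ++ lines) attr (s + pre.length) (e + pre.length) = pvBLacks lines attr s e := by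
  unfold pvBLacks
  have hm : max ((s + pre.length : Nat) : Int) (((e + pre.length : Nat) : Int) - 9)
      = max (s : Int) ((e : Int) - 9) + pre.length := by
    push_cast; omega
  rw [hm]
  have ha0 : (0 : Int) ≤ max (s : Int) ((e : Int) - 9) := le_trans (by positivity) (le_max_left _ _)
  rw [PySem.List.slice_toNat _ (by omega) (by push_cast; omega),
      PySem.List.slice_toNat _ ha0 (by positivity)]
  have h1 : (max (s : Int) ((e : Int) - 9) + (pre.length : Int)).toNat
      = pre.length + (max (s : Int) ((e : Int) - 9)).toNat := by omega
  rw [h1]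
  rw [← List.drop_drop, List.drop_left]
  have h2 : (((e + pre.length : Nat) : Int) + 1).toNat - (pre.length + (max (s : Int) ((e : Int) - 9)).toNat)
      = ((e : Int) + 1).toNat - (max (s : Int) ((e : Int) - 9)).toNat := by
    push_cast; omega
  rw [h2]

-- pushing a pairwise index shift through filter-then-project
theorem pvFilterMapSnd (f : Nat → Nat) (P Q : Nat × Nat → Bool) :
    ∀ (l : List (Nat × Nat)), (∀ p ∈ l, P (Prod.map f f p) = Q p) →
    ((l.map (Prod.map f f)).filter P).map Prod.snd = ((l.filter Q).map Prod.snd).map f := by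
  intro l
  induction l with
  | nil => intro _; rfl
  | cons p l ih =>
    intro h
    obtain ⟨a, b⟩ := p
    have hpq := h (a, b) (List.mem_cons_self ..)
    have ihh := ih (fun q hq2 => h q (List.mem_cons_of_mem _ hq2))
    simp only [List.map_cons, List.filter_cons]
    rw [hpq]
    by_cases hq : Q (a, b) = true
    · rw [if_pos hq, if_pos hq]
      simp [ihh]
    · rw [if_neg hq, if_neg hq]
      exact ihh

-- quote-flag list of a line list with non-quote head
theorem pvMap_cons_false (x : String) (ls : List String) (hx : pvIsQuote x = false) :
    (x :: ls).map pvIsQuote = false :: ls.map pvIsQuote := by simp [hx]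

theorem pvBNeeds_cons_false (x : String) (ls : List String) (attr : String) (hx : pvIsQuote x = false) :
    pvBNeeds (x :: ls) attr = (pvBNeeds ls attr).map (· + 1) := by
  unfold pvBNeeds
  rw [pvMap_cons_false x ls hx, pvBStarts_cons_false, pvBEnds_cons_false, List.zip_map]
  exact pvFilterMapSnd (· + 1) _ _ _
    (fun p _ => by obtain ⟨a, b⟩ := p; exact pvBLacks_append [x] ls attr a b)

-- the needs list over a maximal leading quote run
theorem pvBNeeds_run (run rest : List String) (attr : String) (hrun : run ≠ [])
    (hall : ∀ x ∈ run, pvIsQuote x = true)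
    (hrest : (rest.map pvIsQuote).getD 0 false = false) :
    pvBNeeds (run ++ rest) attr =
      (if pvBLacks (run ++ rest) attr 0 (run.length - 1) then [run.length - 1] else [])
        ++ (pvBNeeds rest attr).map (· + run.length) := by
  have hq : (run ++ rest).map pvIsQuote = List.replicate run.length true ++ rest.map pvIsQuote := by
    rw [List.map_append]
    congr 1
    apply List.eq_replicate_iff.mpr
    exact ⟨by simp, fun b hb => by
      rcases List.mem_map.mp hb with ⟨x, hx, rfl⟩
      exact hall x hx⟩
  have hm : 1 ≤ run.length := by
    cases run with
    | nil => exact absurd rfl hrun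
    | cons _ _ => simp
  unfold pvBNeeds
  rw [hq, pvBStarts_run run.length hm _ hrest, pvBEnds_run run.length hm _ hrest,
      List.zip_cons_cons, List.zip_map, List.filter_cons]
  have hcond : pvBLacks (run ++ rest) attr ((0 : Nat), run.length - 1).1 ((0 : Nat), run.length - 1).2
      = pvBLacks (run ++ rest) attr 0 (run.length - 1) := rfl
  rw [hcond]
  have key := pvFilterMapSnd (· + run.length)
      (fun se => pvBLacks (run ++ rest) attr se.1 se.2)
      (fun se => pvBLacks rest attr se.1 se.2)
      ((pvBStarts (rest.map pvIsQuote)).zip (pvBEnds (rest.map pvIsQuote)))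
      (fun p _ => by obtain ⟨a, b⟩ := p; exact pvBLacks_append run rest attr a b)
  by_cases hl : pvBLacks (run ++ rest) attr 0 (run.length - 1) = true
  · rw [if_pos hl, if_pos hl, List.map_cons, key]
    rfl
  · rw [if_neg hl, if_neg hl]
    exact key.trans (List.nil_append _).symm

-- A's per-run body written with B's lacks test
theorem pvAProcess_eq_lacks (attr : String) (run rest : List String) (hrun : run ≠ []) :
    pvAProcess attr run
      = run ++ (if pvBLacks (run ++ rest) attr 0 (run.length - 1) then pvBSnippet attr else []) := by
  have hm : 1 ≤ run.length := by
    cases run with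
    | nil => exact absurd rfl hrun
    | cons _ _ => simp
  have htail : PySem.List.slice (run ++ rest) (some (max ((0 : Nat) : Int) (((run.length - 1 : Nat) : Int) - 9)))
      (some (((run.length - 1 : Nat) : Int) + 1)) = PySem.List.slice run (some (-10)) none := by
    rw [PySem.List.slice_from_neg_ofNat run 10 (by omega)]
    have hcast : ((run.length - 1 : Nat) : Int) = (run.length : Int) - 1 := by push_cast [hm]; ring
    have ha0 : (0 : Int) ≤ max ((0 : Nat) : Int) (((run.length - 1 : Nat) : Int) - 9) := le_max_left _ _
    rw [PySem.List.slice_toNat _ ha0 (by rw [hcast]; omega)]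
    have h1 : (max ((0 : Nat) : Int) (((run.length - 1 : Nat) : Int) - 9)).toNat = run.length - 10 := by
      rw [hcast]; omega
    have h2 : ((((run.length - 1 : Nat) : Int) + 1)).toNat = run.length := by
      rw [hcast]; omega
    rw [h1, h2]
    rcases Nat.lt_or_ge run.length 10 with hsm | hbig
    · rw [show run.length - 10 = 0 by omega]
      simp only [List.drop_zero, Nat.sub_zero]
      exact List.take_left ..
    · rw [List.drop_append_of_le_length (by omega)]
      have hlen : (run.drop (run.length - 10)).length = 10 := by
        rw [List.length_drop]; omega
      rw [show run.length - (run.length - 10) = 10 by omega]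
      rw [List.take_left' hlen]
  unfold pvAProcess pvBLacks
  rw [htail]
  have hne : run.isEmpty = false := by
    cases run with
    | nil => exact absurd rfl hrun
    | cons _ _ => rfl
  rw [hne]
  simp only [Bool.false_eq_true, if_false]
  split_ifs with h1 h2 <;> simp_all [pvQuotedSnippet, pvBSnippet]

-- pvACollect splits off the leading quote run
theorem pvACollect_spec (lines : List String) : ∀ block,
    pvACollect block lines =
      (block ++ lines.takeWhile pvIsQuote, lines.dropWhile pvIsQuote) := by
  induction lines with
  | nil => intro block; simp [pvACollect]
  | cons l rest ih =>
    intro block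
    by_cases h : pvIsQuote l
    · simp [pvACollect, h, ih]
    · simp [pvACollect, h]

-- dropWhile's head flag is false (or the list is empty)
theorem pvDropWhile_flag (lines : List String) :
    ((lines.dropWhile pvIsQuote).map pvIsQuote).getD 0 false = false := by
  rcases hdw : lines.dropWhile pvIsQuote with _ | ⟨r, rest⟩
  · rfl
  · have hh := List.head?_dropWhile_not pvIsQuote lines
    rw [hdw] at hh
    simp at hh
    simp [hh]

-- membership shape of the needs list over a run decomposition
theorem pvNeeds_run_mem (run rest : List String) (attr : String) (hrun : run ≠ [])
    (hall : ∀ x ∈ run, pvIsQuote x = true)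
    (hrest : (rest.map pvIsQuote).getD 0 false = false) :
    ∀ i ∈ pvBNeeds (run ++ rest) attr, i = run.length - 1 ∨ run.length ≤ i := by
  intro i hi
  rw [pvBNeeds_run run rest attr hrun hall hrest] at hi
  rcases List.mem_append.mp hi with h | h
  · left
    by_cases hl : pvBLacks (run ++ rest) attr 0 (run.length - 1) <;> simp [hl] at h
    exact h
  · right
    rcases List.mem_map.mp h with ⟨j, _, rfl⟩
    omega

-- the core loop equivalence
theorem pvALoop_eq_emit (attr : String) (lines out : List String) :
    pvALoop attr lines out
      = out ++ pvEmitRec (pvBSnippet attr) (pvBNeeds lines attr) 0 lines := by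
  induction lines, out using pvALoop.induct attr with
  | case1 out => simp [pvALoop, pvEmitRec]
  | case2 out l rest h ih =>
    rw [pvALoop]
    simp only [h, dif_pos]
    rw [ih, pvACollect_spec]
    simp only [List.nil_append]
    set run := (l :: rest).takeWhile pvIsQuote with hrundef
    set rest' := (l :: rest).dropWhile pvIsQuote with hrestdef
    have hsplit : (l :: rest) = run ++ rest' := (List.takeWhile_append_dropWhile).symm
    have hrun_ne : run ≠ [] := by
      rw [hrundef]
      simp [List.takeWhile_cons, h]
    have hall : ∀ x ∈ run, pvIsQuote x = true := fun x hx => List.mem_takeWhile_imp hx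
    have hrest_flag : (rest'.map pvIsQuote).getD 0 false = false := pvDropWhile_flag (l :: rest)
    have hmem := pvNeeds_run_mem run rest' attr hrun_ne hall hrest_flag
    have hm1 : 1 ≤ run.length := by
      cases hru : run with
      | nil => exact absurd hru hrun_ne
      | cons _ _ => simp [hru]
    rw [hsplit]
    rw [pvEmitRec_append]
    rw [pvEmitRec_run (pvBSnippet attr) _ run 0 hrun_ne (fun i hi => by
      rcases hmem i hi with h1 | h1
      · left; omega
      · right; omega)]
    have hcontains : (pvBNeeds (run ++ rest') attr).contains (0 + run.length - 1)
        = (if pvBLacks (run ++ rest') attr 0 (run.length - 1) then true else false) := by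
      rw [pvBNeeds_run run rest' attr hrun_ne hall hrest_flag]
      have hnotmem : run.length - 1 ∉ (pvBNeeds rest' attr).map (· + run.length) := by
        intro hmm
        rcases List.mem_map.mp hmm with ⟨j, _, hj⟩
        omega
      by_cases hl : pvBLacks (run ++ rest') attr 0 (run.length - 1)
      · simp [hl, Nat.zero_add]
      · simp only [hl, if_false, List.nil_append, Nat.zero_add]
        simp [hnotmem]
    rw [hcontains]
    have htailpart : pvEmitRec (pvBSnippet attr) (pvBNeeds (run ++ rest') attr) (0 + run.length) rest'
        = pvEmitRec (pvBSnippet attr) (pvBNeeds rest' attr) 0 rest' := by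
      rw [pvEmitRec_congr (pvBSnippet attr) _ ((pvBNeeds rest' attr).map (· + run.length)) rest' (0 + run.length)
        (fun i hi => by
          rw [pvBNeeds_run run rest' attr hrun_ne hall hrest_flag]
          by_cases hl : pvBLacks (run ++ rest') attr 0 (run.length - 1)
          · simp only [hl, if_true, List.singleton_append]
            by_cases hmm : i ∈ (pvBNeeds rest' attr).map (· + run.length)
            · simp [hmm]
            · have hni : i ≠ run.length - 1 := by omega
              simp [hmm, hni]
          · simp [hl])]
      have hsh := pvEmitRec_shift (pvBSnippet attr) (pvBNeeds rest' attr) run.length rest' 0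
      rw [Nat.zero_add] at hsh ⊢
      rw [hsh]
    rw [htailpart]
    rw [pvAProcess_eq_lacks attr run rest' hrun_ne]
    by_cases hl : pvBLacks (run ++ rest') attr 0 (run.length - 1) <;> simp [hl]
  | case3 out l rest h ih =>
    rw [pvALoop]
    simp only [h, Bool.false_eq_true, dif_neg, not_false_iff]
    rw [ih]
    have hf : pvIsQuote l = false := by revert h; cases pvIsQuote l <;> simp
    rw [pvBNeeds_cons_false l rest attr hf]
    have h0 : ((pvBNeeds rest attr).map (· + 1)).contains 0 = false := by
      have : (0 : Nat) ∉ (pvBNeeds rest attr).map (· + 1) := by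
        intro hm
        rcases List.mem_map.mp hm with ⟨j, _, hj⟩
        omega
      simp [this]
    simp only [pvEmitRec, h0, Bool.false_eq_true, if_false, List.nil_append]
    have hsh := pvEmitRec_shift (pvBSnippet attr) (pvBNeeds rest attr) 1 rest 0
    rw [Nat.zero_add] at hsh
    rw [hsh]
    simp

-- ===== VERDICT =====
theorem inject_attribution_to_blockquotes_py_spec : Claim_equal_inject_attribution_to_blockquotes_py := by
  intro md_text attribution_text _
  unfold Spec_inject_attribution_to_blockquotes_py
  simp only [inject_attribution_to_blockquotes_py, inject_attribution_to_blockquotes_py_alt]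
  rw [pvALoop_eq_emit]
  rw [List.range_eq_range', pvEmit_fold_eq]
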